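-- pv_equiv track=rewrite | github.com/neurord/NeuroRDanal | header_parse.py | subvol_list
-- ===== SOURCE A (Python) =====
-- def subvol_list(structType,regionID,volnum,fake):
--     yes=1
--     no=0
--     #all voxels should be read in now with labels
--     #extract number of unique regions (e.g. dendrite, or sa1[0]),
--     #and create list of subvolumes which contribute to that region
--     regionList=list()
--     regionVox=list()
--     regionCol=list()
--     regionStructList=list()
--     regionStructVox=list()
--     regionStructCol=list()
--
--     for i in range(len(volnum)):
--         if (structType[i] != fake):
--             unique=yes
--             regionStruct=regionID[i]+structType[i]
--             uniqueStruct=yes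
--             #print "vol,regionStruct",i,regionStruct,"num regions:", len(regionList)
--             #first construct list of region specific voxels
--             j=0
--             while ((unique==yes) and (j<len(regionList))):
--                 if regionID[i]==regionList[j]:
--                     regionVox[j].append(volnum[i])
--                     regionCol[j].append(i)
--                     unique=no
--                 #endif
--                 j+=1
--             #endwhile
--             if (unique==yes):
--                 regionList.append(regionID[i])
--                 regionVox.append([])
--                 regionCol.append([])
--                 regionVox[len(regionList)-1].append(volnum[i])
--                 regionCol[len(regionList)-1].append(i)
--             #endif
--             #second construct list of region and structure specific voxels.
--             j=0
--             while ((uniqueStruct==yes) and (j<len(regionStructList))):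
--                 if (regionStruct==regionStructList[j]):
--                     regionStructVox[j].append(volnum[i])
--                     regionStructCol[j].append(i)
--                     uniqueStruct=no
--                 #endif
--                 j+=1
--             #endwhile
--             if (uniqueStruct==yes):
--                 regionStructList.append(regionStruct)
--                 regionStructVox.append([])
--                 regionStructCol.append([])
--                 regionStructVox[len(regionStructList)-1].append(volnum[i])
--                 regionStructCol[len(regionStructList)-1].append(i)
--             #endif
--     #end for i
--     return regionList,regionVox,regionCol,regionStructList,regionStructVox,regionStructCol
-- ===== SOURCE B (Python) =====
-- def subvol_list(structType, regionID, volnum, fake):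
--     # Partition-based grouping: instead of inserting element by element with an
--     # inner first-match scan, pair each surviving index with its key once, then
--     # peel off one WHOLE group at a time by repeatedly partitioning the rest.
--     idxs = [i for i in range(len(volnum)) if structType[i] != fake]
--
--     def group(keyed):
--         names, voxs, cols = [], [], []
--         rest = keyed
--         while rest:
--             k = rest[0][1]
--             names.append(k)
--             voxs.append([volnum[i] for i, q in rest if q == k])
--             cols.append([i for i, q in rest if q == k])
--             rest = [(i, q) for i, q in rest if q != k]
--         return names, voxs, cols
--
--     regionList, regionVox, regionCol = group([(i, regionID[i]) for i in idxs])
--     structList, structVox, structCol = group(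
--         [(i, regionID[i] + structType[i]) for i in idxs])
--     return regionList, regionVox, regionCol, structList, structVox, structCol
-- ===== Notes on version B (the rewrite author's own statement) =====
-- stated objective: alternative
-- what changed: A inserts element by element, scanning the grouped-so-far lists for a first match at every index; B first filters the non-fake indices once and then builds each output group WHOLE, by repeatedly partitioning the remaining index list on the key of its first element (two calls of one partition-grouping helper), so no per-element scan of the accumulated groups exists and each group is emitted complete before the next starts.
import Mathlib
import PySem

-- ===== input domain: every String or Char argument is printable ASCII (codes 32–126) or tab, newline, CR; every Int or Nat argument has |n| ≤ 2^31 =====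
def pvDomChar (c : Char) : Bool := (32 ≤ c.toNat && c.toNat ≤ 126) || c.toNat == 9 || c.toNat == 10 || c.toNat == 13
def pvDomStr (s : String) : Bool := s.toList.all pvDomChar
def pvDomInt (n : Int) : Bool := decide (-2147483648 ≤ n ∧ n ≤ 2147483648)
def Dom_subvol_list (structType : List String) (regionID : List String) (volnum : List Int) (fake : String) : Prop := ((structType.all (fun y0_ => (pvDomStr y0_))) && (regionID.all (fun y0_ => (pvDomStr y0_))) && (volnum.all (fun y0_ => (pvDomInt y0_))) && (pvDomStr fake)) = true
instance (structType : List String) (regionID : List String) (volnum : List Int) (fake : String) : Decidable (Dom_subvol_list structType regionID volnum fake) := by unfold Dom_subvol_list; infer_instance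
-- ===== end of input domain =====

-- B replaces A's element-at-a-time insertion (with an inner first-match scan of the
-- groups built so far) by repeated partitioning of the remaining (index, key) pairs,
-- emitting each group whole before the next; a different algorithm of similar cost.

-- ===== PORT A =====
-- the inner while loop of A: scan the three parallel lists for the first entry equal to k,
-- append (v, i) to its buckets, or append a fresh bucket at the end if k is unique
def pvScanA : List String → List (List Int) → List (List Int) → String → Int → Int →
    List String × List (List Int) × List (List Int)
  | q :: ks, w :: vs, c :: cs, k, v, i =>
      if k == q then (q :: ks, (w ++ [v]) :: vs, (c ++ [i]) :: cs)
      else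
        let r := pvScanA ks vs cs k v i
        (q :: r.1, w :: r.2.1, c :: r.2.2)
  | ks, vs, cs, k, v, i => (ks ++ [k], vs ++ [[v]], cs ++ [[i]])

def subvol_list (structType : List String) (regionID : List String) (volnum : List Int) (fake : String) : List String × List (List Int) × List (List Int) × List String × List (List Int) × List (List Int) :=
  let st := (PySem.List.pyRange 0 volnum.length 1).foldl
    (fun (st : (List String × List (List Int) × List (List Int)) ×
               (List String × List (List Int) × List (List Int))) (i : Int) =>
      if PySem.List.pyGetD structType i "" ≠ fake then
        (pvScanA st.1.1 st.1.2.1 st.1.2.2 (PySem.List.pyGetD regionID i "")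
           (PySem.List.pyGetD volnum i 0) i,
         pvScanA st.2.1 st.2.2.1 st.2.2.2
           (PySem.List.pyGetD regionID i "" ++ PySem.List.pyGetD structType i "")
           (PySem.List.pyGetD volnum i 0) i)
      else st)
    (([], [], []), ([], [], []))
  (st.1.1, st.1.2.1, st.1.2.2, st.2.1, st.2.2.1, st.2.2.2)

-- ===== PORT B =====
-- Source B's helper group(keyed): while rest is nonempty, take k = key of the first pair,
-- emit the whole bucket of pairs whose key equals k, and recurse on those whose key differs
-- fuel (initially the list length) only makes the recursion structural; each step strictly
-- shrinks the list, so the 0-fuel branch is never reached from subvol_list_alt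
def pvGroupB (vol : Int → Int) : Nat → List (Int × String) →
    List String × List (List Int) × List (List Int)
  | _, [] => ([], [], [])
  | 0, _ :: _ => ([], [], [])
  | fuel + 1, p0 :: t =>
      let k := p0.2
      let same := (p0 :: t).filter (fun p => p.2 == k)
      let r := pvGroupB vol fuel ((p0 :: t).filter (fun p => !(p.2 == k)))
      (k :: r.1, (same.map (fun p => vol p.1)) :: r.2.1, (same.map (fun p => p.1)) :: r.2.2)

def subvol_list_alt (structType : List String) (regionID : List String) (volnum : List Int) (fake : String) : List String × List (List Int) × List (List Int) × List String × List (List Int) × List (List Int) :=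
  let idxs := (PySem.List.pyRange 0 volnum.length 1).filter
    (fun i => !(PySem.List.pyGetD structType i "" == fake))
  let r := pvGroupB (fun i => PySem.List.pyGetD volnum i 0) idxs.length
    (idxs.map (fun i => (i, PySem.List.pyGetD regionID i "")))
  let s := pvGroupB (fun i => PySem.List.pyGetD volnum i 0) idxs.length
    (idxs.map (fun i => (i, PySem.List.pyGetD regionID i "" ++ PySem.List.pyGetD structType i "")))
  (r.1, r.2.1, r.2.2, s.1, s.2.1, s.2.2)

-- ===== PRECONDITION & SPEC =====
-- A raises IndexError iff some i < len(volnum) is out of range of structType, or is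
-- out of range of regionID while structType[i] != fake; Pre_ excludes exactly those inputs.
def Pre_subvol_list (structType : List String) (regionID : List String) (volnum : List Int) (fake : String) : Prop :=
  volnum.length ≤ structType.length ∧
  ∀ i < volnum.length, structType.getD i "" ≠ fake → i < regionID.length
instance (structType : List String) (regionID : List String) (volnum : List Int) (fake : String) : Decidable (Pre_subvol_list structType regionID volnum fake) := by unfold Pre_subvol_list; infer_instance

def pvWitness_subvol_list : List String × List String × List Int × String :=
  (["a", "x"], ["r1", "r2"], [5, 7], "x")

def Spec_subvol_list (structType : List String) (regionID : List String) (volnum : List Int) (fake : String) (out : List String × List (List Int) × List (List Int) × List String × List (List Int) × List (List Int)) : Prop := out = subvol_list_alt structType regionID volnum fake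
instance (structType : List String) (regionID : List String) (volnum : List Int) (fake : String) (out : List String × List (List Int) × List (List Int) × List String × List (List Int) × List (List Int)) : Decidable (Spec_subvol_list structType regionID volnum fake out) := by
  unfold Spec_subvol_list
  letI i3 : DecidableEq (List String × List (List Int) × List (List Int)) := inferInstance
  letI i4 : DecidableEq (List (List Int) × List String × List (List Int) × List (List Int)) := @instDecidableEqProd _ _ inferInstance i3
  letI i5 : DecidableEq (List (List Int) × List (List Int) × List String × List (List Int) × List (List Int)) := @instDecidableEqProd _ _ inferInstance i4
  letI i6 : DecidableEq (List String × List (List Int) × List (List Int) × List String × List (List Int) × List (List Int)) := @instDecidableEqProd _ _ inferInstance i5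
  exact i6 _ _

-- ===== CLAIM (what is proved, stated in full; the proofs are below) =====
def Claim_equal_subvol_list : Prop := ∀ (structType : List String) (regionID : List String) (volnum : List Int) (fake : String), Dom_subvol_list structType regionID volnum fake → Pre_subvol_list structType regionID volnum fake → Spec_subvol_list structType regionID volnum fake (subvol_list structType regionID volnum fake)

-- ===== LEMMAS AND PROOFS =====

-- distinct keys of a list in first-occurrence order, via repeated partition
def pvFirstKeys {α : Type} (key : α → String) : List α → List String
  | [] => []
  | a0 :: t => key a0 :: pvFirstKeys key (t.filter (fun a => !(key a == key a0)))
termination_by l => l.length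
decreasing_by
  simp only [List.unattach_filter, List.unattach_attach, List.length_cons]
  exact Nat.lt_succ_of_le (List.length_filter_le _ t)

-- the canonical grouping both programs compute
def pvCanon {α : Type} (vol col : α → Int) (key : α → String) (I : List α) :
    List String × List (List Int) × List (List Int) :=
  (pvFirstKeys key I,
   (pvFirstKeys key I).map (fun k => (I.filter (fun a => key a == k)).map vol),
   (pvFirstKeys key I).map (fun k => (I.filter (fun a => key a == k)).map col))

lemma pvMemFirstKeys {α : Type} (key : α → String) (I : List α) (k : String) :
    k ∈ pvFirstKeys key I ↔ k ∈ I.map key := by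
  induction I using pvFirstKeys.induct key with
  | case1 => simp [pvFirstKeys]
  | case2 a0 t ih =>
    simp only [List.unattach_filter, List.unattach_attach] at ih
    rw [pvFirstKeys]
    simp only [List.mem_cons, List.map_cons]
    by_cases hk : k = key a0
    · simp [hk]
    · rw [ih]
      constructor
      · rintro (h | h)
        · exact absurd h hk
        · rcases List.mem_map.mp h with ⟨j, hj, he⟩
          exact Or.inr (List.mem_map.mpr ⟨j, List.mem_of_mem_filter hj, he⟩)
      · rintro (h | h)
        · exact Or.inl h
        · rcases List.mem_map.mp h with ⟨j, hj, he⟩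
          exact Or.inr (List.mem_map.mpr ⟨j, List.mem_filter.mpr ⟨hj, by simp [he, hk]⟩, he⟩)

lemma pvNodupFirstKeys {α : Type} (key : α → String) (I : List α) :
    (pvFirstKeys key I).Nodup := by
  induction I using pvFirstKeys.induct key with
  | case1 => simp [pvFirstKeys]
  | case2 a0 t ih =>
    simp only [List.unattach_filter, List.unattach_attach] at ih
    rw [pvFirstKeys]
    refine List.nodup_cons.mpr ⟨?_, ih⟩
    intro h
    rcases List.mem_map.mp ((pvMemFirstKeys _ _ _).mp h) with ⟨j, hj, he⟩
    have := (List.mem_filter.mp hj).2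
    simp [he] at this

lemma pvFilterFilter {α : Type} (key : α → String) (I : List α) (k k' : String) (h : k' ≠ k) :
    (I.filter (fun a => !(key a == k))).filter (fun a => key a == k')
      = I.filter (fun a => key a == k') := by
  rw [List.filter_filter]
  apply List.filter_congr
  intro j _
  by_cases hj : key j = k'
  · simp [hj, h]
  · simp [hj]

-- B computes the canonical grouping of its (index, key) pairs (given enough fuel)
lemma pvBCanon (vol : Int → Int) (fuel : Nat) (I : List (Int × String))
    (hf : I.length ≤ fuel) :
    pvGroupB vol fuel I = pvCanon (fun p => vol p.1) (fun p => p.1) (fun p => p.2) I := by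
  induction fuel generalizing I with
  | zero =>
    cases I with
    | nil => rw [pvGroupB, pvCanon, pvFirstKeys]; rfl
    | cons p0 t => simp at hf
  | succ fuel ih =>
    cases I with
    | nil => rw [pvGroupB, pvCanon, pvFirstKeys]; rfl
    | cons p0 t =>
      rw [pvGroupB, pvCanon, pvFirstKeys]
      have hhead : (p0 :: t).filter (fun p => !(p.2 == p0.2))
          = t.filter (fun p => !(p.2 == p0.2)) := by
        simp
      have hlen : ((p0 :: t).filter (fun p => !(p.2 == p0.2))).length ≤ fuel := by
        rw [hhead]
        exact le_trans (List.length_filter_le _ t) (Nat.succ_le_succ_iff.mp hf)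
      have ihh := ih _ hlen
      rw [hhead] at ihh ⊢
      rw [ihh, pvCanon]
      refine congrArg₂ Prod.mk rfl (congrArg₂ Prod.mk ?_ ?_) <;>
      · simp only [List.map_cons, List.cons.injEq]
        refine ⟨by trivial, ?_⟩
        apply List.map_congr_left
        intro k' hk'
        have hne : k' ≠ p0.2 := by
          intro he
          rcases List.mem_map.mp ((pvMemFirstKeys _ _ _).mp hk') with ⟨j, hj, hkey⟩
          have := (List.mem_filter.mp hj).2
          simp [hkey, he] at this
        rw [pvFilterFilter (fun p => p.2) t p0.2 k' hne]
        have : (p0 :: t).filter (fun p => p.2 == k')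
            = t.filter (fun p => p.2 == k') := by
          simp [Ne.symm hne]
        rw [this]

-- pvScanA on a canonical state, new key: appends a fresh singleton group
lemma pvScanANew (ks : List String) (F G : String → List Int) (k : String) (v i : Int)
    (h : k ∉ ks) :
    pvScanA ks (ks.map F) (ks.map G) k v i
      = (ks ++ [k], ks.map F ++ [[v]], ks.map G ++ [[i]]) := by
  induction ks with
  | nil => rfl
  | cons q t ih =>
    have hq : (k == q) = false := by
      simp only [beq_eq_false_iff_ne]; intro he; exact h (he ▸ List.mem_cons_self)
    simp only [List.map_cons, pvScanA, hq, Bool.false_eq_true, if_false]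
    rw [ih (fun hm => h (List.mem_cons_of_mem _ hm))]
    simp

-- pvScanA on a canonical state, existing key: appends (v,i) to that key's group
lemma pvScanAOld (ks : List String) (F G : String → List Int) (k : String) (v i : Int)
    (hnd : ks.Nodup) (h : k ∈ ks) :
    pvScanA ks (ks.map F) (ks.map G) k v i
      = (ks, ks.map (fun k' => if k' = k then F k' ++ [v] else F k'),
             ks.map (fun k' => if k' = k then G k' ++ [i] else G k')) := by
  induction ks with
  | nil => cases h
  | cons q t ih =>
    by_cases hk : k = q
    · subst hk
      have hkt : k ∉ t := (List.nodup_cons.mp hnd).1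
      simp only [List.map_cons, pvScanA, beq_self_eq_true, if_true]
      refine congrArg₂ Prod.mk rfl (congrArg₂ Prod.mk ?_ ?_) <;>
      · refine congrArg _ ?_
        apply List.map_congr_left
        intro k' hk'
        rw [if_neg]
        rintro rfl
        exact hkt hk'
    · have hq : (k == q) = false := by simp [hk]
      have hkt : k ∈ t := by rcases List.mem_cons.mp h with h | h; exact absurd h hk; exact h
      simp only [List.map_cons, pvScanA, hq, Bool.false_eq_true, if_false]
      rw [ih (List.nodup_cons.mp hnd).2 hkt]
      simp [Ne.symm hk]

-- appending one element to the canonical grouping = one pvScanA step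
lemma pvCanonSnoc {α : Type} (vol col : α → Int) (key : α → String) (P : List α) (x : α) :
    pvScanA (pvCanon vol col key P).1 (pvCanon vol col key P).2.1 (pvCanon vol col key P).2.2
        (key x) (vol x) (col x)
      = pvCanon vol col key (P ++ [x]) := by
  have hfilter : ∀ k', (P ++ [x]).filter (fun a => key a == k')
      = P.filter (fun a => key a == k') ++ (if key x = k' then [x] else []) := by
    intro k'
    rw [List.filter_append]
    congr 1
    by_cases h : key x = k' <;> simp [h]
  by_cases hmem : key x ∈ pvFirstKeys key P
  · -- existing key
    have hmap : key x ∈ P.map key := (pvMemFirstKeys _ _ _).mp hmem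
    have hfk : pvFirstKeys key (P ++ [x]) = pvFirstKeys key P := by
      clear hfilter hmem
      induction P using pvFirstKeys.induct key with
      | case1 => simp at hmap
      | case2 a0 t ih =>
        simp only [List.unattach_filter, List.unattach_attach] at ih
        rw [show (a0 :: t) ++ [x] = a0 :: (t ++ [x]) from rfl, pvFirstKeys]
        conv_rhs => rw [pvFirstKeys]
        simp only [List.cons.injEq, true_and]
        rw [List.filter_append]
        by_cases hx : key x = key a0
        · simp [hx]
        · have : [x].filter (fun a => !(key a == key a0)) = [x] := by simp [hx]
          rw [this]
          apply ih
          simp only [List.map_cons, List.mem_cons] at hmap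
          rcases hmap with h | h
          · exact absurd h hx
          · rcases List.mem_map.mp h with ⟨j, hj, he⟩
            exact List.mem_map.mpr ⟨j, List.mem_filter.mpr ⟨hj, by simp [he, hx]⟩, he⟩
    unfold pvCanon
    rw [pvScanAOld _ _ _ _ _ _ (pvNodupFirstKeys key P) hmem, hfk]
    refine congrArg₂ Prod.mk rfl (congrArg₂ Prod.mk ?_ ?_) <;>
    · apply List.map_congr_left
      intro k' _
      rw [hfilter k']
      by_cases h : k' = key x
      · simp [h]
      · simp [h, Ne.symm h]
  · -- new key
    have hmap : key x ∉ P.map key := fun h => hmem ((pvMemFirstKeys _ _ _).mpr h)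
    have hfk : pvFirstKeys key (P ++ [x]) = pvFirstKeys key P ++ [key x] := by
      clear hfilter hmem
      induction P using pvFirstKeys.induct key with
      | case1 => simp [pvFirstKeys]
      | case2 a0 t ih =>
        simp only [List.unattach_filter, List.unattach_attach] at ih
        rw [show (a0 :: t) ++ [x] = a0 :: (t ++ [x]) from rfl, pvFirstKeys]
        conv_rhs => rw [pvFirstKeys]
        simp only [List.cons_append, List.cons.injEq, true_and]
        rw [List.filter_append]
        have hx : key x ≠ key a0 := fun h => hmap (by simp [h])
        have : [x].filter (fun a => !(key a == key a0)) = [x] := by simp [hx]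
        rw [this]
        apply ih
        intro h
        rcases List.mem_map.mp h with ⟨j, hj, he⟩
        exact hmap (List.mem_map.mpr ⟨j, List.mem_cons_of_mem _ (List.mem_of_mem_filter hj), he⟩)
    have hempty : P.filter (fun a => key a == key x) = [] := by
      apply List.filter_eq_nil_iff.mpr
      intro j hj
      simp only [Bool.not_eq_true, beq_eq_false_iff_ne]
      exact fun he => hmap (List.mem_map.mpr ⟨j, hj, he⟩)
    unfold pvCanon
    rw [pvScanANew _ _ _ _ _ _ hmem, hfk]
    refine congrArg₂ Prod.mk rfl (congrArg₂ Prod.mk ?_ ?_) <;>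
    · rw [List.map_append]
      congr 1
      · apply List.map_congr_left
        intro k' hk'
        rw [hfilter k']
        have : key x ≠ k' := fun h => hmem (h ▸ hk')
        simp [this]
      · simp [hfilter, hempty]

-- A's fold over a list computes the canonical grouping
lemma pvACanon {α : Type} (vol col : α → Int) (key : α → String) (I : List α) :
    I.foldl (fun (t : List String × List (List Int) × List (List Int)) a =>
        pvScanA t.1 t.2.1 t.2.2 (key a) (vol a) (col a)) ([], [], [])
      = pvCanon vol col key I := by
  induction I using List.reverseRecOn with
  | nil => simp [pvCanon, pvFirstKeys]
  | append_singleton P x ih =>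
    rw [List.foldl_append, List.foldl_cons, List.foldl_nil, ih]
    exact pvCanonSnoc vol col key P x

-- pairing each element with its key once does not change the canonical grouping
lemma pvCanonMap (vol : Int → Int) (key : Int → String) (I : List Int) :
    pvCanon (fun p => vol p.1) (fun p => p.1) (fun p => p.2)
        (I.map (fun a => (a, key a)))
      = pvCanon vol (fun a => a) key I := by
  have hfk : ∀ J : List Int,
      pvFirstKeys (fun p : Int × String => p.2) (J.map (fun a => (a, key a)))
        = pvFirstKeys key J := by
    intro J
    induction J using pvFirstKeys.induct key with
    | case1 => simp [pvFirstKeys]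
    | case2 a0 t ih =>
      simp only [List.unattach_filter, List.unattach_attach] at ih
      rw [List.map_cons, pvFirstKeys]
      conv_rhs => rw [pvFirstKeys]
      simp only [List.cons.injEq, true_and]
      rw [List.filter_map]
      exact ih
  have hfilt : ∀ (k : String),
      (I.map (fun a => (a, key a))).filter (fun p => p.2 == k)
        = (I.filter (fun a => key a == k)).map (fun a => (a, key a)) := by
    intro k
    rw [List.filter_map]
    rfl
  unfold pvCanon
  rw [hfk I]
  refine congrArg₂ Prod.mk rfl (congrArg₂ Prod.mk ?_ ?_) <;>
  · apply List.map_congr_left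
    intro k _
    rw [hfilt k, List.map_map]
    rfl

-- a guarded fold of a pair of independent steps = two folds over the filtered list
lemma pvSplitFilter {α σ τ : Type} (c : α → Bool) (f : σ → α → σ) (g : τ → α → τ)
    (L : List α) (s : σ) (t : τ) :
    L.foldl (fun st a => if c a = true then (f st.1 a, g st.2 a) else st) (s, t)
      = ((L.filter c).foldl f s, (L.filter c).foldl g t) := by
  induction L generalizing s t with
  | nil => rfl
  | cons a L ih =>
    by_cases h : c a <;>
      simp [List.foldl_cons, h, ih]

lemma pvMain (structType regionID : List String) (volnum : List Int) (fake : String) :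
    subvol_list structType regionID volnum fake
      = subvol_list_alt structType regionID volnum fake := by
  unfold subvol_list subvol_list_alt
  have hc : ∀ i : Int, (PySem.List.pyGetD structType i "" ≠ fake)
      = ((!(PySem.List.pyGetD structType i "" == fake)) = true) := by
    intro i; simp
  simp only [hc]
  rw [pvSplitFilter (fun i => !(PySem.List.pyGetD structType i "" == fake))
    (fun (t : List String × List (List Int) × List (List Int)) i =>
        pvScanA t.1 t.2.1 t.2.2 (PySem.List.pyGetD regionID i "")
          (PySem.List.pyGetD volnum i 0) i)
    (fun (t : List String × List (List Int) × List (List Int)) i =>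
        pvScanA t.1 t.2.1 t.2.2
          (PySem.List.pyGetD regionID i "" ++ PySem.List.pyGetD structType i "")
          (PySem.List.pyGetD volnum i 0) i)]
  rw [pvACanon (fun i => PySem.List.pyGetD volnum i 0) (fun a => a)
        (fun i => PySem.List.pyGetD regionID i ""),
      pvACanon (fun i => PySem.List.pyGetD volnum i 0) (fun a => a)
        (fun i => PySem.List.pyGetD regionID i "" ++ PySem.List.pyGetD structType i ""),
      pvBCanon _ _ _ (by rw [List.length_map]),
      pvBCanon _ _ _ (by rw [List.length_map]),
      pvCanonMap (fun i => PySem.List.pyGetD volnum i 0)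
        (fun i => PySem.List.pyGetD regionID i ""),
      pvCanonMap (fun i => PySem.List.pyGetD volnum i 0)
        (fun i => PySem.List.pyGetD regionID i "" ++ PySem.List.pyGetD structType i "")]

-- ===== VERDICT (by name: the statement is the Claim_ definition above) =====
theorem subvol_list_spec : Claim_equal_subvol_list := by
  intro structType regionID volnum fake _ _
  unfold Spec_subvol_list
  exact pvMain structType regionID volnum fake
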